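-- pv_equiv track=rewrite | github.com/qn06142/coding-python | scheduletest.py | greedy_load_balance
-- ===== SOURCE A (Python) =====
-- def greedy_load_balance(tasks, num_cores):
--     sorted_tasks = sorted(enumerate(tasks), key=lambda x: x[1], reverse=True)
--     core_loads = [0] * num_cores
--     assignment = [None] * len(tasks)
--     for task_idx, task_length in sorted_tasks:
--         min_core = core_loads.index(min(core_loads))
--         assignment[task_idx] = min_core
--         core_loads[min_core] += task_length
--     return assignment, core_loads, max(core_loads)
-- ===== SOURCE B (Python) =====
-- def greedy_load_balance(tasks, num_cores):
--     # Keep the cores in a list 'queue' sorted ascending by (load, core index):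
--     # the head is always the least-loaded core (lowest index on ties), so no
--     # per-task rescan of all core loads is needed; after assigning a task we
--     # re-insert the updated core at its ordered position, found by binary search.
--     queue = [(0, c) for c in range(num_cores)]
--     loads = [0] * num_cores
--     assignment = [0] * len(tasks)
--     for i, t in sorted(enumerate(tasks), key=lambda p: p[1], reverse=True):
--         load, c = queue.pop(0)
--         new = (load + t, c)
--         lo, hi = 0, len(queue)
--         while lo < hi:
--             mid = (lo + hi) // 2
--             if queue[mid] < new:
--                 lo = mid + 1
--             else:
--                 hi = mid
--         queue.insert(lo, new)
--         assignment[i] = c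
--         loads[c] = load + t
--     return assignment, loads, max(loads)
-- ===== Notes on version B (the rewrite author's own statement) =====
-- stated objective: faster
-- what changed: Instead of rescanning all core loads with min() plus .index() for every task, B maintains the cores as a list kept sorted ascending by (load, core index), pops the head (the least-loaded, lowest-index core) and re-inserts the updated core at its binary-searched position.
-- outside the precondition, e.g. on greedy_load_balance([1, 2], 0): A raises ValueError, B raises IndexError
import Mathlib
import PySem

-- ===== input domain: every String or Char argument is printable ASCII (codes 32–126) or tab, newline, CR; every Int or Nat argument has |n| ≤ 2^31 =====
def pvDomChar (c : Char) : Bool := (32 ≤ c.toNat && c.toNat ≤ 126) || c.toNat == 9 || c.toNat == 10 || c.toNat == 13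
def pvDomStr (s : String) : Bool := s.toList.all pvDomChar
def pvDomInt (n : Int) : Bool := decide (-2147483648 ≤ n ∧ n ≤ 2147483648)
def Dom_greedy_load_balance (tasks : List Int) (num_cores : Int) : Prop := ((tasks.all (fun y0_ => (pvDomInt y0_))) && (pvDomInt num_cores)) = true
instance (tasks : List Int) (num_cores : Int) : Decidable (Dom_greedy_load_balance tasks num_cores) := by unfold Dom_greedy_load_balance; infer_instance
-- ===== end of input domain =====

-- B replaces A's per-task min()+.index() rescan of the loads by a core queue kept
-- sorted by (load, core index), popped at the head and re-filled by binary search.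

-- ===== PORT A =====
-- the body of A's 'for' loop (one task pair (task_idx, task_length) applied to (assignment, core_loads))
def glbStepA (st : List Int × List Int) (p : Int × Int) : List Int × List Int :=
  let m := (PySem.List.min? st.2 (fun x => x)).getD 0                 -- min(core_loads); none (ValueError) only outside Pre_
  let min_core : Int := (((PySem.List.index? st.2 m).getD 0 : Nat) : Int)  -- core_loads.index(min(core_loads))
  (PySem.List.pySetD st.1 p.1 min_core,                               -- assignment[task_idx] = min_core
   PySem.List.pySetD st.2 min_core ((PySem.List.pyGetD st.2 min_core 0) + p.2))  -- core_loads[min_core] += task_length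

def greedy_load_balance (tasks : List Int) (num_cores : Int) : List Int × List Int × Int :=
  let sorted_tasks := PySem.List.sorted (PySem.List.enumerate tasks 0) (fun x => x.2) true
  let core_loads0 := PySem.List.pyRepeat [(0 : Int)] num_cores       -- [0] * num_cores
  let assignment0 := PySem.List.pyRepeat [(0 : Int)] (tasks.length : Int)  -- [None]*len(tasks); the None placeholders are
      -- modelled as 0: under Pre_ (num_cores ≥ 1) every slot is overwritten before the list is returned
  let st := sorted_tasks.foldl glbStepA (assignment0, core_loads0)
  (st.1, st.2, (PySem.List.max? st.2 (fun x => x)).getD 0)            -- max(core_loads); none only outside Pre_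

-- ===== PORT B =====
-- Python tuple '<' on pairs of ints (lexicographic); exact for int pairs
def pairLt (a b : Int × Int) : Bool := decide (a.1 < b.1) || (a.1 == b.1 && decide (a.2 < b.2))

-- the 'lo, hi' binary-search while loop of Source B, verbatim
def bsLoop (q : List (Int × Int)) (nw : Int × Int) (lo hi : Int) : Int :=
  if h : lo < hi then
    let mid := PySem.Int.floordiv (lo + hi) 2                          -- (lo + hi) // 2
    if pairLt (PySem.List.pyGetD q mid (0, 0)) nw then                 -- queue[mid] < new
      bsLoop q nw (mid + 1) hi
    else
      bsLoop q nw lo mid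
  else lo
termination_by (hi - lo).toNat
decreasing_by
  all_goals
    have h2 := PySem.Int.floordiv_two_mid_bounds (le_of_lt h)
    have h3 : PySem.Int.floordiv (lo + hi) 2 < hi := by
      rw [PySem.Int.floordiv_lt_iff_lt_mul (by omega)]; omega
    omega

-- the body of B's 'for' loop applied to (assignment, loads, queue)
def glbStepB (st : List Int × List Int × List (Int × Int)) (p : Int × Int) : List Int × List Int × List (Int × Int) :=
  match st.2.2 with
  | [] => st                                                           -- queue.pop(0) raises IndexError; only outside Pre_
  | hd :: rest =>                                                      -- load, c = queue.pop(0)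
    let nw := (hd.1 + p.2, hd.2)                                       -- new = (load + t, c)
    let j := bsLoop rest nw 0 (rest.length : Int)
    (PySem.List.pySetD st.1 p.1 hd.2,                                  -- assignment[i] = c
     PySem.List.pySetD st.2.1 hd.2 (hd.1 + p.2),                       -- loads[c] = load + t
     PySem.List.insert rest j nw)                                      -- queue.insert(lo, new)

def greedy_load_balance_alt (tasks : List Int) (num_cores : Int) : List Int × List Int × Int :=
  let queue0 := (PySem.List.pyRange 0 num_cores 1).map (fun c => ((0 : Int), c))
  let loads0 := PySem.List.pyRepeat [(0 : Int)] num_cores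
  let assignment0 := PySem.List.pyRepeat [(0 : Int)] (tasks.length : Int)
  let st := (PySem.List.sorted (PySem.List.enumerate tasks 0) (fun p => p.2) true).foldl
      glbStepB (assignment0, loads0, queue0)
  (st.1, st.2.1, (PySem.List.max? st.2.1 (fun x => x)).getD 0)

-- ===== PRECONDITION & SPEC =====
-- Pre_ excludes exactly num_cores ≤ 0, where Python A raises (min() or max() of the empty core list)
def Pre_greedy_load_balance (tasks : List Int) (num_cores : Int) : Prop := 1 ≤ num_cores
instance (tasks : List Int) (num_cores : Int) : Decidable (Pre_greedy_load_balance tasks num_cores) := by unfold Pre_greedy_load_balance; infer_instance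
def pvWitness_greedy_load_balance : List Int × Int := ([3, 1, 2], 2)

def Spec_greedy_load_balance (tasks : List Int) (num_cores : Int) (out : List Int × List Int × Int) : Prop := out = greedy_load_balance_alt tasks num_cores
instance (tasks : List Int) (num_cores : Int) (out : List Int × List Int × Int) : Decidable (Spec_greedy_load_balance tasks num_cores out) := by unfold Spec_greedy_load_balance; infer_instance

-- ===== CLAIM (what is proved, stated in full; the proofs are below) =====
def Claim_equal_greedy_load_balance : Prop := ∀ (tasks : List Int) (num_cores : Int), Dom_greedy_load_balance tasks num_cores → Pre_greedy_load_balance tasks num_cores → Spec_greedy_load_balance tasks num_cores (greedy_load_balance tasks num_cores)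

-- ===== LEMMAS AND PROOFS =====

-- the lexicographic ≤ on (load, core) pairs: the order B's queue is kept sorted in
def lexLE (a b : Int × Int) : Prop := a.1 < b.1 ∨ (a.1 = b.1 ∧ a.2 ≤ b.2)

theorem pairLt_iff (a b : Int × Int) : pairLt a b = true ↔ ¬ lexLE b a := by
  simp [pairLt, lexLE]; omega

theorem lexLE_of_not {a b : Int × Int} (h : ¬ lexLE b a) : lexLE a b := by
  simp only [lexLE] at *; omega

theorem lexLE_of_not_pairLt {a b : Int × Int} (h : ¬ pairLt a b = true) : lexLE b a := by
  by_contra hc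
  exact h ((pairLt_iff a b).mpr hc)

-- the (load, core-index) pairs of a load list, indices starting at k
def pairsFrom : Int → List Int → List (Int × Int)
  | _, [] => []
  | k, a :: l => (a, k) :: pairsFrom (k + 1) l

theorem mem_pairsFrom {x : Int × Int} : ∀ (k : Int) (l : List Int),
    x ∈ pairsFrom k l ↔ ∃ (i : Nat) (h : i < l.length), x = (l[i], k + i) := by
  intro k l
  induction l generalizing k with
  | nil => simp [pairsFrom]
  | cons a t ih =>
    simp only [pairsFrom, List.mem_cons, ih (k + 1)]
    constructor
    · rintro (rfl | ⟨i, h, rfl⟩)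
      · exact ⟨0, by simp, by simp⟩
      · exact ⟨i + 1, by simpa using h, by simp; ring⟩
    · rintro ⟨i, h, rfl⟩
      cases i with
      | zero => left; simp
      | succ i => right; exact ⟨i, by simpa using h, by simp; ring⟩

theorem pairsFrom_split : ∀ (l : List Int) (k : Int) (i : Nat) (h : i < l.length),
    pairsFrom k l = pairsFrom k (l.take i) ++ (l[i], k + i) :: pairsFrom (k + i + 1) (l.drop (i + 1)) := by
  intro l
  induction l with
  | nil => intro k i h; simp at h
  | cons a t ih =>
    intro k i h
    cases i with
    | zero => simp [pairsFrom]
    | succ i =>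
      simp only [List.take_succ_cons, List.drop_succ_cons, pairsFrom, List.cons_append,
        List.getElem_cons_succ]
      rw [ih (k + 1) i (by simpa using h)]
      have e1 : k + 1 + (i : Int) = k + ((i + 1 : Nat) : Int) := by push_cast; ring
      rw [e1]

theorem pairsFrom_set (l : List Int) (k : Int) (i : Nat) (v : Int) (h : i < l.length) :
    pairsFrom k (l.set i v) = pairsFrom k (l.take i) ++ (v, k + i) :: pairsFrom (k + i + 1) (l.drop (i + 1)) := by
  have h' : i < (l.set i v).length := by simpa using h
  rw [pairsFrom_split (l.set i v) k i h']
  rw [List.take_set, List.drop_set]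
  have h1 : (List.take i l).set i v = List.take i l := by
    apply List.set_eq_of_length_le; simp
  simp [h1, List.getElem_set_self (by simpa using h)]

theorem lexLE_trans {a b c : Int × Int} (h1 : lexLE a b) (h2 : lexLE b c) : lexLE a c := by
  simp only [lexLE] at *; omega

theorem bsLoop_spec (q : List (Int × Int)) (nw : Int × Int) (hq : q.Pairwise lexLE) :
    ∀ (lo hi : Int), 0 ≤ lo → lo ≤ hi → hi ≤ (q.length : Int) →
    (∀ (i : Nat) (h : i < q.length), (i : Int) < lo → pairLt q[i] nw = true) →
    (∀ (i : Nat) (h : i < q.length), hi ≤ (i : Int) → ¬ pairLt q[i] nw = true) →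
    0 ≤ bsLoop q nw lo hi ∧ bsLoop q nw lo hi ≤ (q.length : Int) ∧
    (∀ (i : Nat) (h : i < q.length), (i : Int) < bsLoop q nw lo hi → pairLt q[i] nw = true) ∧
    (∀ (i : Nat) (h : i < q.length), bsLoop q nw lo hi ≤ (i : Int) → ¬ pairLt q[i] nw = true) := by
  have hmono := List.pairwise_iff_getElem.mp hq
  intro lo hi
  induction lo, hi using bsLoop.induct q nw with
  | case1 lo hi h mid hcond ih =>
    intro h0 h1 h2 hlo hhi
    have hb := PySem.Int.floordiv_two_mid_bounds (le_of_lt h)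
    have hm3 : PySem.Int.floordiv (lo + hi) 2 < hi := by
      rw [PySem.Int.floordiv_lt_iff_lt_mul (by omega)]; omega
    have hmn : mid.toNat < q.length := by omega
    have hget : PySem.List.pyGetD q mid (0, 0) = q[mid.toNat] :=
      PySem.List.pyGetD_eq_getElem q (0, 0) (by omega) (by omega)
    rw [bsLoop]
    simp only [dif_pos h]
    rw [if_pos hcond]
    apply ih (by omega) (by omega) h2
    · intro i hik hlt
      by_cases hcase : (i : Int) < lo
      · exact hlo i hik hcase
      · -- lo ≤ i ≤ mid : q[i] ≤ q[mid] < nw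
        rw [hget] at hcond
        by_cases hieq : i = mid.toNat
        · subst hieq; exact hcond
        · have hij : i < mid.toNat := by omega
          have hle : lexLE q[i] q[mid.toNat] := hmono i mid.toNat hik hmn hij
          rw [pairLt_iff] at hcond ⊢
          exact fun hc => hcond (lexLE_trans hc hle)
    · exact hhi
  | case2 lo hi h mid hcond ih =>
    intro h0 h1 h2 hlo hhi
    have hb := PySem.Int.floordiv_two_mid_bounds (le_of_lt h)
    have hm3 : PySem.Int.floordiv (lo + hi) 2 < hi := by
      rw [PySem.Int.floordiv_lt_iff_lt_mul (by omega)]; omega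
    have hmn : mid.toNat < q.length := by omega
    have hget : PySem.List.pyGetD q mid (0, 0) = q[mid.toNat] :=
      PySem.List.pyGetD_eq_getElem q (0, 0) (by omega) (by omega)
    rw [bsLoop]
    simp only [dif_pos h]
    rw [if_neg hcond]
    apply ih h0 (by omega) (by omega) hlo
    · intro i hik hge
      rw [hget] at hcond
      have hmi : lexLE nw q[mid.toNat] := by
        by_contra hc
        exact hcond (by rw [pairLt_iff]; exact hc)
      by_cases hieq : i = mid.toNat
      · subst hieq
        rw [pairLt_iff]
        exact fun hc => hc hmi
      · have hij : mid.toNat < i := by omega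
        have hle : lexLE q[mid.toNat] q[i] := hmono mid.toNat i hmn hik hij
        rw [pairLt_iff]
        exact fun hc => hc (lexLE_trans hmi hle)
  | case3 lo hi h =>
    intro h0 h1 h2 hlo hhi
    rw [bsLoop]
    simp only [dif_neg h]
    exact ⟨h0, by omega, fun i hik hlt => hlo i hik hlt, fun i hik hge => hhi i hik (by omega)⟩

-- the invariant tying B's queue to the current load list
def QInv (loads : List Int) (q : List (Int × Int)) : Prop :=
  q.Perm (pairsFrom 0 loads) ∧ q.Pairwise lexLE

-- head of the queue = (min load, first core index attaining it)
theorem head_min (loads : List Int) (hd : Int × Int) (rest : List (Int × Int))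
    (hinv : QInv loads (hd :: rest)) :
    ∃ (i : Nat) (h : i < loads.length), hd = (loads[i], (i : Int)) ∧
      PySem.List.min? loads (fun x => x) = some loads[i] ∧
      PySem.List.index? loads loads[i] = some i := by
  obtain ⟨hperm, hpair⟩ := hinv
  have hmem : hd ∈ pairsFrom 0 loads := hperm.subset (List.mem_cons_self)
  obtain ⟨i, hlen, hhd⟩ := (mem_pairsFrom 0 loads).mp hmem
  have hhd' : hd = (loads[i], (i : Int)) := by simpa using hhd
  have hne : loads ≠ [] := List.ne_nil_of_length_pos (by omega)
  -- the head's load is minimal among all loads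
  have hheadmin : ∀ (j : Nat), (hj : j < loads.length) → loads[i] ≤ loads[j] := by
    intro j hj
    have hpj : (loads[j], (j : Int)) ∈ pairsFrom 0 loads :=
      (mem_pairsFrom 0 loads).mpr ⟨j, hj, by simp⟩
    rcases List.mem_cons.mp (hperm.symm.subset hpj) with heq | hmemr
    · rw [hhd'] at heq
      simp only [Prod.mk.injEq] at heq
      omega
    · have hle := (List.pairwise_cons.mp hpair).1 _ hmemr
      rw [hhd'] at hle
      rcases hle with h1 | ⟨h1, _⟩ <;> omega
  -- the head's core index is the first one attaining the minimum
  have hfirst : ∀ (j : Nat), j < i → (hj : j < loads.length) → loads[j] ≠ loads[i] := by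
    intro j hji hj heq
    have hpj : (loads[i], (j : Int)) ∈ pairsFrom 0 loads :=
      (mem_pairsFrom 0 loads).mpr ⟨j, hj, by simp [heq]⟩
    rcases List.mem_cons.mp (hperm.symm.subset hpj) with h2 | hmemr
    · rw [hhd'] at h2
      simp only [Prod.mk.injEq] at h2
      omega
    · have hle := (List.pairwise_cons.mp hpair).1 _ hmemr
      rw [hhd'] at hle
      rcases hle with h1 | ⟨h1, h2⟩ <;> [omega; exact absurd h2 (by push_cast; omega)]
  obtain ⟨m, hm⟩ : ∃ m, PySem.List.min? loads (fun x => x) = some m := by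
    rcases hmo : PySem.List.min? loads (fun x => x) with _ | m
    · exact absurd ((PySem.List.min?_eq_none_iff loads _).mp hmo) hne
    · exact ⟨m, rfl⟩
  have hmi : m = loads[i] := by
    refine le_antisymm (PySem.List.min?_isMin hm _ (List.getElem_mem hlen)) ?_
    obtain ⟨j, hj, hje⟩ := List.mem_iff_getElem.mp (PySem.List.min?_mem hm)
    rw [← hje]
    exact hheadmin j hj
  refine ⟨i, hlen, hhd', by rw [hm, hmi], ?_⟩
  rw [PySem.List.index?_eq_some_iff]
  refine ⟨loads.take i, loads.drop (i + 1), ?_, by simp [Nat.min_eq_left hlen.le], ?_⟩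
  · conv_lhs => rw [← List.take_append_drop i loads]
    rw [List.getElem_cons_drop]
  · intro hmem2
    obtain ⟨j, hj, hje⟩ := List.mem_iff_getElem.mp hmem2
    rw [List.getElem_take] at hje
    have hji : j < i ∧ j < loads.length := by simpa using hj
    exact hfirst j hji.1 hji.2 hje

-- one loop step: B's step matches A's and preserves the invariant
theorem step_eq (an loads : List Int) (q : List (Int × Int)) (p : Int × Int)
    (hinv : QInv loads q) (hne : loads ≠ []) :
    (glbStepB (an, loads, q) p).1 = (glbStepA (an, loads) p).1 ∧
    (glbStepB (an, loads, q) p).2.1 = (glbStepA (an, loads) p).2 ∧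
    QInv (glbStepA (an, loads) p).2 (glbStepB (an, loads, q) p).2.2 ∧
    (glbStepA (an, loads) p).2 ≠ [] := by
  cases q with
  | nil =>
    exfalso
    have hnil : pairsFrom 0 loads = [] := List.Perm.nil_eq hinv.1 |>.symm
    cases loads with
    | nil => exact hne rfl
    | cons a t => simp [pairsFrom] at hnil
  | cons hd rest =>
    obtain ⟨i, hlen, hhd, hmin, hidx⟩ := head_min loads hd rest hinv
    obtain ⟨hperm, hpair⟩ := hinv
    have hrest_pair : rest.Pairwise lexLE := (List.pairwise_cons.mp hpair).2
    have hmono := List.pairwise_iff_getElem.mp hrest_pair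
    -- A's step picks core i with the minimum load
    have hidx' : List.idxOf? loads[i] loads = some i := by
      rw [← PySem.List.index?_eq_idxOf?]; exact hidx
    have hA : glbStepA (an, loads) p =
        (PySem.List.pySetD an p.1 (i : Int), loads.set i (loads[i] + p.2)) := by
      simp [glbStepA, hmin, hidx', PySem.List.pyGetD_natCast, PySem.List.pySetD_natCast,
        List.getElem?_eq_getElem hlen]
    -- B's step pops the head (which is (loads[i], i)) and re-inserts the updated pair
    have hd1 : hd.1 = loads[i] := by rw [hhd]
    have hd2 : hd.2 = (i : Int) := by rw [hhd]
    have hB : glbStepB (an, loads, hd :: rest) p =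
        (PySem.List.pySetD an p.1 hd.2, PySem.List.pySetD loads hd.2 (hd.1 + p.2),
         PySem.List.insert rest (bsLoop rest (hd.1 + p.2, hd.2) 0 (rest.length : Int)) (hd.1 + p.2, hd.2)) := by
      simp [glbStepB]
    set nw : Int × Int := (hd.1 + p.2, hd.2) with hnw
    set j : Int := bsLoop rest nw 0 (rest.length : Int) with hjdef
    have hbs := bsLoop_spec rest nw hrest_pair 0 (rest.length : Int) le_rfl
      (by omega) le_rfl (by intro a ha hlt; omega) (by intro a ha hge; omega)
    obtain ⟨hj0, hjle, hblt, hbge⟩ := hbs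
    rw [← hjdef] at hj0 hjle hblt hbge
    have hjn : j.toNat ≤ rest.length := by omega
    have hins : PySem.List.insert rest j nw =
        rest.take j.toNat ++ nw :: rest.drop j.toNat := by
      conv_lhs => rw [show j = ((j.toNat : Nat) : Int) from (Int.toNat_of_nonneg hj0).symm]
      exact PySem.List.insert_natCast _ _ _ hjn
    -- the split of pairsFrom 0 loads around position i
    have hsplit : pairsFrom 0 loads =
        pairsFrom 0 (loads.take i) ++ hd :: pairsFrom ((i : Int) + 1) (loads.drop (i + 1)) := by
      have := pairsFrom_split loads 0 i hlen
      rw [this, hhd]; norm_num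
    have hset : pairsFrom 0 (loads.set i (loads[i] + p.2)) =
        pairsFrom 0 (loads.take i) ++ nw :: pairsFrom ((i : Int) + 1) (loads.drop (i + 1)) := by
      have := pairsFrom_set loads 0 i (loads[i] + p.2) hlen
      rw [this, hnw, hd1, hd2]; norm_num
    have hrestperm : rest.Perm (pairsFrom 0 (loads.take i) ++ pairsFrom ((i : Int) + 1) (loads.drop (i + 1))) := by
      apply List.Perm.cons_inv (a := hd)
      exact hperm.trans (by rw [hsplit]; exact List.perm_middle)
    have hpermnew : (rest.take j.toNat ++ nw :: rest.drop j.toNat).Perm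
        (pairsFrom 0 (loads.set i (loads[i] + p.2))) := by
      refine List.perm_middle.trans ?_
      rw [List.take_append_drop]
      refine (hrestperm.cons nw).trans ?_
      rw [hset]
      exact List.perm_middle.symm
    -- sortedness of the queue after the ordered re-insertion
    have hpairnew : (rest.take j.toNat ++ nw :: rest.drop j.toNat).Pairwise lexLE := by
      rw [List.pairwise_append]
      refine ⟨hrest_pair.sublist (List.take_sublist _ _), ?_, ?_⟩
      · rw [List.pairwise_cons]
        refine ⟨?_, hrest_pair.sublist (List.drop_sublist _ _)⟩
        intro b hb
        obtain ⟨idx, hidx2, rfl⟩ := List.mem_iff_getElem.mp hb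
        rw [List.getElem_drop]
        have hbnd : j.toNat + idx < rest.length := by
          have := hidx2; simp [List.length_drop] at this; omega
        exact lexLE_of_not_pairLt (hbge (j.toNat + idx) hbnd (by omega))
      · intro a ha b hb
        obtain ⟨idx, hidx2, rfl⟩ := List.mem_iff_getElem.mp ha
        rw [List.getElem_take]
        have hidxj : idx < j.toNat := by simp at hidx2; omega
        have hidxlen : idx < rest.length := by omega
        have hanw : lexLE (rest[idx]'hidxlen) nw :=
          lexLE_of_not (fun hc => ((pairLt_iff _ _).mp (hblt idx hidxlen (by omega))) hc)
        rcases List.mem_cons.mp hb with rfl | hbdrop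
        · exact hanw
        · obtain ⟨idx2, hidx3, rfl⟩ := List.mem_iff_getElem.mp hbdrop
          rw [List.getElem_drop]
          have hbnd : j.toNat + idx2 < rest.length := by
            have := hidx3; simp [List.length_drop] at this; omega
          exact hmono idx (j.toNat + idx2) hidxlen hbnd (by omega)
    refine ⟨?_, ?_, ?_, ?_⟩
    · rw [hA, hB, hd2]
    · rw [hA, hB, hd1, hd2, PySem.List.pySetD_natCast]
    · rw [hA, hB, hins]
      exact ⟨hpermnew, hpairnew⟩
    · rw [hA]
      intro hc
      have hlz := congrArg List.length hc
      simp at hlz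
      exact hne hlz

-- the whole loop: B's fold tracks A's fold and keeps the queue invariant
theorem fold_eq (ts : List (Int × Int)) : ∀ (an loads : List Int) (q : List (Int × Int)),
    QInv loads q → loads ≠ [] →
    (ts.foldl glbStepB (an, loads, q)).1 = (ts.foldl glbStepA (an, loads)).1 ∧
    (ts.foldl glbStepB (an, loads, q)).2.1 = (ts.foldl glbStepA (an, loads)).2 := by
  induction ts with
  | nil => exact fun an loads q hinv hne => ⟨rfl, rfl⟩
  | cons p ts ih =>
    intro an loads q hinv hne
    obtain ⟨h1, h2, hinv', hne'⟩ := step_eq an loads q p hinv hne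
    simp only [List.foldl_cons]
    have hstB : glbStepB (an, loads, q) p =
        ((glbStepA (an, loads) p).1, (glbStepA (an, loads) p).2, (glbStepB (an, loads, q) p).2.2) :=
      Prod.ext h1 (Prod.ext h2 rfl)
    rw [hstB]
    exact ih _ _ _ hinv' hne'

theorem pairsFrom_replicate (n : Nat) : ∀ (k : Int),
    pairsFrom k (List.replicate n (0 : Int)) = (List.range n).map (fun (c : Nat) => ((0 : Int), k + (c : Int))) := by
  induction n with
  | zero => intro k; simp [pairsFrom]
  | succ n ih =>
    intro k
    rw [List.replicate_succ, List.range_succ_eq_map]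
    simp only [pairsFrom, ih (k + 1), List.map_cons, List.map_map]
    congr 1
    · simp
    · apply List.map_congr_left
      intro a _
      simp only [Function.comp_apply, Prod.mk.injEq, true_and]
      push_cast
      ring

-- the initial queue [(0, c) for c in range(num_cores)] satisfies the invariant
theorem init_inv (num_cores : Int) :
    QInv (List.replicate num_cores.toNat (0 : Int))
      ((PySem.List.pyRange 0 num_cores 1).map (fun c => ((0 : Int), c))) := by
  have hq0 : (PySem.List.pyRange 0 num_cores 1).map (fun c => ((0 : Int), c)) =
      (List.range num_cores.toNat).map (fun (c : Nat) => ((0 : Int), (c : Int))) := by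
    rw [PySem.List.pyRange_one, List.map_map]
    norm_num
  constructor
  · rw [hq0, pairsFrom_replicate]
    simp
  · rw [hq0]
    refine List.Pairwise.map _ ?_ List.pairwise_lt_range
    intro a b hab
    right
    exact ⟨rfl, by simp; omega⟩

-- ===== VERDICT (by name: the statement is the Claim_ definition above) =====
theorem greedy_load_balance_spec : Claim_equal_greedy_load_balance := by
  intro tasks num_cores _hdom hpre
  unfold Spec_greedy_load_balance
  unfold Pre_greedy_load_balance at hpre
  unfold greedy_load_balance greedy_load_balance_alt
  simp only [PySem.List.pyRepeat_singleton]
  have hne : List.replicate num_cores.toNat (0 : Int) ≠ [] := by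
    simp only [ne_eq, List.replicate_eq_nil_iff]
    omega
  obtain ⟨h1, h2⟩ := fold_eq (PySem.List.sorted (PySem.List.enumerate tasks 0) (fun x => x.2) true)
    (List.replicate (tasks.length : Int).toNat 0) (List.replicate num_cores.toNat 0)
    ((PySem.List.pyRange 0 num_cores 1).map (fun c => ((0 : Int), c)))
    (init_inv num_cores) hne
  exact Prod.ext h1.symm (Prod.ext h2.symm (by rw [h2]))
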